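-- pv_equiv track=rewrite | github.com/yash-jhunjhunwala/aws-network-analyzer | src/aws_network_analyzer/main.py | select_best_region
-- ===== SOURCE A (Python) =====
-- def select_best_region(account_data):
--     """Select the best region for deployment based on environment type."""
--     for region, data in account_data.items():
--         if data.get("environment") == "TGW_HUB":
--             return region
--     for region, data in account_data.items():
--         if data.get("environment") == "SINGLE_VPC":
--             return region
--     for region, data in account_data.items():
--         if data.get("environment") == "VPC_HUB":
--             return region
--     return None
-- ===== SOURCE B (Python) =====
-- def select_best_region(account_data):
--     """Select the best region for deployment based on environment type."""
--     first_seen = {}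
--     for region, data in account_data.items():
--         first_seen.setdefault(data.get("environment"), region)
--     if "TGW_HUB" in first_seen:
--         return first_seen["TGW_HUB"]
--     if "SINGLE_VPC" in first_seen:
--         return first_seen["SINGLE_VPC"]
--     if "VPC_HUB" in first_seen:
--         return first_seen["VPC_HUB"]
--     return None
-- ===== Notes on version B (the rewrite author's own statement) =====
-- stated objective: simpler
-- what changed: Replaces three priority-ordered full scans with a single pass that records the first region seen per environment tag in a dict, followed by three constant-time priority lookups.
import Mathlib
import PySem

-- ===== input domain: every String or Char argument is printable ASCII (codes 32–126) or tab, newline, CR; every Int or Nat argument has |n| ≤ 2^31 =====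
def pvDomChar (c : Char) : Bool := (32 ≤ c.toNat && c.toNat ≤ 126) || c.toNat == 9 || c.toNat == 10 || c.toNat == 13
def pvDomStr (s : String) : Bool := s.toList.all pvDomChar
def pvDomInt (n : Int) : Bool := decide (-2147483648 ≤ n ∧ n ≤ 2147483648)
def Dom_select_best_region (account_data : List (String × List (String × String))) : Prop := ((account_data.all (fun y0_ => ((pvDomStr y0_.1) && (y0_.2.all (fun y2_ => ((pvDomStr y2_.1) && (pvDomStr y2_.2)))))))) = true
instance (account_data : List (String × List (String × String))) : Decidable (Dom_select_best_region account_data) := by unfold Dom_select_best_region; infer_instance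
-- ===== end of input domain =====

-- B replaces A's three priority-ordered scans by one index-building pass plus three lookups (objective: simpler).

-- ===== PORT A =====
-- data.get("environment"): first-match lookup in the association list (Python dict lookup)
def pvEnvOf (data : List (String × String)) : Option String :=
  (data.find? (fun p => p.1 == "environment")).map (·.2)

-- one 'for region, data in account_data.items(): if data.get("environment") == env: return region' loop
def pvScanA (env : String) : List (String × List (String × String)) → Option String
  | [] => none
  | (region, data) :: rest =>
      if pvEnvOf data = some env then some region else pvScanA env rest

def select_best_region (account_data : List (String × List (String × String))) : Option String :=
  match pvScanA "TGW_HUB" account_data with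
  | some region => some region
  | none =>
    match pvScanA "SINGLE_VPC" account_data with
    | some region => some region
    | none =>
      match pvScanA "VPC_HUB" account_data with
      | some region => some region
      | none => none

-- ===== PORT B =====
def select_best_region_alt (account_data : List (String × List (String × String))) : Option String :=
  let first_seen : PySem.Dict (Option String) String :=
    account_data.foldl (fun fs p => fs.setdefault (pvEnvOf p.2) p.1) PySem.Dict.empty
  match first_seen.get? (some "TGW_HUB") with
  | some region => some region
  | none =>
    match first_seen.get? (some "SINGLE_VPC") with
    | some region => some region
    | none => first_seen.get? (some "VPC_HUB")

-- ===== PRECONDITION & SPEC =====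
def Spec_select_best_region (account_data : List (String × List (String × String))) (out : Option String) : Prop := out = select_best_region_alt account_data
instance (account_data : List (String × List (String × String))) (out : Option String) : Decidable (Spec_select_best_region account_data out) := by unfold Spec_select_best_region; infer_instance

-- ===== CLAIM (what is proved, stated in full; the proofs are below) =====
def Claim_equal_select_best_region : Prop := ∀ (account_data : List (String × List (String × String))), Dom_select_best_region account_data → Spec_select_best_region account_data (select_best_region account_data)

-- ===== LEMMAS AND PROOFS =====

-- first region whose environment (as an Option, None included) equals k
def pvFindK (k : Option String) : List (String × List (String × String)) → Option String
  | [] => none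
  | (region, data) :: rest => if pvEnvOf data = k then some region else pvFindK k rest

theorem pvFindK_some (env : String) (l : List (String × List (String × String))) :
    pvFindK (some env) l = pvScanA env l := by
  induction l with
  | nil => rfl
  | cons h t ih => simp [pvFindK, pvScanA, ih]

theorem pvFoldl_setdefault_get? (l : List (String × List (String × String)))
    (d : PySem.Dict (Option String) String) (k : Option String) :
    (l.foldl (fun fs p => fs.setdefault (pvEnvOf p.2) p.1) d).get? k
      = ((d.get? k).or (pvFindK k l)) := by
  induction l generalizing d with
  | nil => simp [pvFindK]
  | cons h t ih =>
    simp only [List.foldl_cons, ih, pvFindK]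
    by_cases hc : d.contains (pvEnvOf h.2)
    · rw [PySem.Dict.setdefault_of_contains d h.1 hc]
      by_cases hk : pvEnvOf h.2 = k
      · subst hk
        have : (d.get? (pvEnvOf h.2)).isSome := by
          rw [← PySem.Dict.contains_eq_isSome_get? d (pvEnvOf h.2)]; exact hc
        cases hg : d.get? (pvEnvOf h.2) with
        | none => rw [hg] at this; simp at this
        | some v => simp
      · simp [hk]
    · have hc' : d.contains (pvEnvOf h.2) = false := by
        cases hcc : d.contains (pvEnvOf h.2) with
        | false => rfl
        | true => exact absurd hcc hc
      rw [PySem.Dict.setdefault_of_not_contains d h.1 hc']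
      have hnone : d.get? (pvEnvOf h.2) = none := by
        have := PySem.Dict.contains_eq_isSome_get? d (pvEnvOf h.2)
        rw [hc'] at this
        cases hg : d.get? (pvEnvOf h.2) with
        | none => rfl
        | some v => rw [hg] at this; simp at this
      by_cases hk : k = pvEnvOf h.2
      · subst hk
        rw [PySem.Dict.get?_insert_self, hnone]
        simp
      · rw [PySem.Dict.get?_insert_of_ne _ _ hk]
        have : pvEnvOf h.2 ≠ k := fun e => hk e.symm
        simp [this]

-- ===== VERDICT (by name: the statement is the Claim_ definition above) =====
theorem select_best_region_spec : Claim_equal_select_best_region := by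
  intro account_data _
  unfold Spec_select_best_region select_best_region select_best_region_alt
  simp only [pvFoldl_setdefault_get?, PySem.Dict.get?_empty, Option.none_or, pvFindK_some]
  cases pvScanA "TGW_HUB" account_data <;>
    cases pvScanA "SINGLE_VPC" account_data <;>
      cases pvScanA "VPC_HUB" account_data <;> rfl
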